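-- pv_equiv track=rewrite | github.com/Janell-Huyck/backend-nested-brackets | nested.py | make_formatted_line
-- ===== SOURCE A (Python) =====
-- def make_formatted_line(line):
--     line = [character for character in line]
--     formatted_line = []
--     skip = False
--     for character_index in range(0, len(line)):
--         if skip is True:
--             skip = False
--             continue
--         if character_index == len(line)-1:
--             formatted_line += [(line[character_index])]
--         elif line[character_index] != "(" and line[character_index] != "*":
--             formatted_line += [(line[character_index])]
--         elif line[character_index] == "(" and line[character_index + 1] == "*":
--             skip = True
--             formatted_line += [("(*")]
--         elif line[character_index] == "(" and line[character_index + 1] != "*":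
--             formatted_line += [(line[character_index])]
--         elif line[character_index] == "*" and line[character_index + 1] == ")":
--             skip = True
--             formatted_line += [("*)")]
--         elif line[character_index] == "*" and line[character_index + 1] != ")":
--             formatted_line += [(line[character_index])]
--         else:
--             print ("I goofed up somewhere in the parsing of the line.")
--     return formatted_line
--
--     print (line)
-- ===== SOURCE B (Python) =====
-- def make_formatted_line(line):
--     formatted_line = []
--     for i, chunk in enumerate(line.split("(*")):
--         if i:
--             formatted_line.append("(*")
--         for j, piece in enumerate(chunk.split("*)")):
--             if j:
--                 formatted_line.append("*)")
--             formatted_line.extend(piece)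
--     return formatted_line
-- ===== Notes on version B (the rewrite author's own statement) =====
-- stated objective: faster
-- what changed: Replaces A's single indexed scan with a skip flag and a six-branch character ladder by staged splits: the line is split on the open-comment token, each chunk is split on the close-comment token, and the pieces are exploded into characters with the merged two-char tokens re-inserted between them; correct because every occurrence of the open token (and, within open-free chunks, of the close token) is exactly a token the greedy scan merges.
import Mathlib
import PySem

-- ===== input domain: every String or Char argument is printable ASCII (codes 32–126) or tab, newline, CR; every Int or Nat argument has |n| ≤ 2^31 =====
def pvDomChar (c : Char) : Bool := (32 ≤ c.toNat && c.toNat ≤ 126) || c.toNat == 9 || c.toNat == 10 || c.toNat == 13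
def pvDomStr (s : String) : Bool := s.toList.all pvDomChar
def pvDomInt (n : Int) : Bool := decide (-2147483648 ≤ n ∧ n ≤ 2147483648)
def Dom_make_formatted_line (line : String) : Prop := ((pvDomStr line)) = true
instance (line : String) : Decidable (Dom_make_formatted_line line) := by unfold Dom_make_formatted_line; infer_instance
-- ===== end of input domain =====

-- B replaces A's indexed scan with a skip flag and a six-branch ladder by staged
-- splits: split the line on "(*", each chunk on "*)", explode the pieces into
-- characters and re-insert the merged tokens between them (objective: faster,
-- measured: C-level str.split replaces the per-char loop).

-- ===== PORT A =====
-- the for-loop over range(0, len(line)) with the skip flag and the elif ladder,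
-- as a recursion on the index i (indices are always in range, so getD is exact)
def aLoop (chars : List Char) (skip : Bool) (acc : List String) (i : Nat) : List String :=
  if i < chars.length then
    if skip = true then aLoop chars false acc (i+1)
    else if i = chars.length - 1 then
      aLoop chars false (acc ++ [String.mk [chars.getD i ' ']]) (i+1)
    else if chars.getD i ' ' ≠ '(' ∧ chars.getD i ' ' ≠ '*' then
      aLoop chars false (acc ++ [String.mk [chars.getD i ' ']]) (i+1)
    else if chars.getD i ' ' = '(' ∧ chars.getD (i+1) ' ' = '*' then
      aLoop chars true (acc ++ ["(*"]) (i+1)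
    else if chars.getD i ' ' = '(' ∧ chars.getD (i+1) ' ' ≠ '*' then
      aLoop chars false (acc ++ [String.mk [chars.getD i ' ']]) (i+1)
    else if chars.getD i ' ' = '*' ∧ chars.getD (i+1) ' ' = ')' then
      aLoop chars true (acc ++ ["*)"]) (i+1)
    else if chars.getD i ' ' = '*' ∧ chars.getD (i+1) ' ' ≠ ')' then
      aLoop chars false (acc ++ [String.mk [chars.getD i ' ']]) (i+1)
    else -- Python's final else only prints and continues
      aLoop chars skip acc (i+1)
  else acc
termination_by chars.length - i

def make_formatted_line (line : String) : List String :=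
  aLoop line.toList false [] 0

-- ===== PORT B =====
-- hand port of str.split(sep) for a two-character separator a·b: leftmost
-- non-overlapping matches (exact: Python scans left to right and skips the
-- matched pair; for our separators "(*" and "*)" matches can never overlap)
def split2 (a b : Char) : List Char → List (List Char)
  | [] => [[]]
  | [c] => [[c]]
  | c :: d :: rest =>
    if c = a ∧ d = b then [] :: split2 a b rest
    else
      match split2 a b (d :: rest) with
      | [] => [[c]]          -- unreachable: split2 never returns []
      | p :: ps => (c :: p) :: ps

-- "first piece plain, every later piece preceded by the separator token"
-- (the 'if i: append(sep)' pattern of Source B)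
def bJoin (sep : String) (pieces : List (List String)) : List String :=
  match pieces with
  | [] => []
  | p :: ps => p ++ ps.flatMap (fun q => sep :: q)

-- inner loop of Source B: one '(*'-free chunk, split on "*)", pieces exploded to chars
def bChunk (chunk : List Char) : List String :=
  bJoin "*)" ((split2 '*' ')' chunk).map (fun p => p.map (fun c => String.mk [c])))

def make_formatted_line_alt (line : String) : List String :=
  bJoin "(*" ((split2 '(' '*' line.toList).map bChunk)

-- ===== PRECONDITION & SPEC =====
def Spec_make_formatted_line (line : String) (out : List String) : Prop := out = make_formatted_line_alt line
instance (line : String) (out : List String) : Decidable (Spec_make_formatted_line line out) := by unfold Spec_make_formatted_line; infer_instance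

-- ===== CLAIM (what is proved, stated in full; the proofs are below) =====
def Claim_equal_make_formatted_line : Prop := ∀ (line : String), Dom_make_formatted_line line → Spec_make_formatted_line line (make_formatted_line line)


-- ===== LEMMAS AND PROOFS =====

-- the common reference point: the greedy two-char tokenizer
def greedy : List Char → List String
  | [] => []
  | [c] => [String.mk [c]]
  | c :: d :: rest =>
    if c = '(' ∧ d = '*' then "(*" :: greedy rest
    else if c = '*' ∧ d = ')' then "*)" :: greedy rest
    else String.mk [c] :: greedy (d :: rest)

theorem aLoop_skip (chars : List Char) (acc : List String) (i : Nat) :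
    aLoop chars true acc (i+1) = aLoop chars false acc (i+2) := by
  rw [aLoop]
  split
  · rfl
  · rw [aLoop]
    split
    · omega
    · rfl

theorem aLoop_eq_greedy (chars : List Char) (i : Nat) (acc : List String) :
    aLoop chars false acc i = acc ++ greedy (chars.drop i) := by
  by_cases h : i < chars.length
  · have hdrop : chars.drop i = chars[i] :: chars.drop (i+1) :=
      List.drop_eq_getElem_cons h
    have hgd : chars.getD i ' ' = chars[i] := List.getD_eq_getElem chars ' ' h
    rw [aLoop]
    simp only [if_pos h]
    by_cases hlast : i = chars.length - 1
    · have hd1 : chars.drop (i+1) = [] := List.drop_eq_nil_of_le (by omega)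
      rw [if_neg (by simp), if_pos hlast, aLoop_eq_greedy chars (i+1), hd1, hdrop, hd1, hgd]
      simp [greedy]
    · have h1 : i + 1 < chars.length := by omega
      have hdrop1 : chars.drop (i+1) = chars[i+1] :: chars.drop (i+2) :=
        List.drop_eq_getElem_cons h1
      have hgd1 : chars.getD (i+1) ' ' = chars[i+1] := List.getD_eq_getElem chars ' ' h1
      have hg : greedy (chars.drop i) =
          if chars[i] = '(' ∧ chars[i+1] = '*' then "(*" :: greedy (chars.drop (i+2))
          else if chars[i] = '*' ∧ chars[i+1] = ')' then "*)" :: greedy (chars.drop (i+2))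
          else String.mk [chars[i]] :: greedy (chars.drop (i+1)) := by
        rw [hdrop, hdrop1]
        rw [greedy, ← hdrop1]
      rw [if_neg (by simp), if_neg hlast]
      by_cases hc : chars.getD i ' ' ≠ '(' ∧ chars.getD i ' ' ≠ '*'
      · rw [if_pos hc, aLoop_eq_greedy chars (i+1), hg]
        rw [hgd] at hc
        rw [if_neg (by tauto), if_neg (by tauto), hgd]
        simp
      · rw [if_neg hc]
        push_neg at hc
        by_cases hos : chars.getD i ' ' = '(' ∧ chars.getD (i+1) ' ' = '*'
        · rw [if_pos hos, aLoop_skip, aLoop_eq_greedy chars (i+2), hg]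
          rw [hgd, hgd1] at hos
          rw [if_pos hos]
          simp
        · rw [if_neg hos]
          by_cases hon : chars.getD i ' ' = '(' ∧ chars.getD (i+1) ' ' ≠ '*'
          · rw [if_pos hon, aLoop_eq_greedy chars (i+1), hg]
            rw [hgd, hgd1] at hon
            rw [if_neg (by tauto), if_neg (by rintro ⟨h1', _⟩; rw [hon.1] at h1'; exact absurd h1' (by decide)), hgd]
            simp
          · rw [if_neg hon]
            by_cases hsc : chars.getD i ' ' = '*' ∧ chars.getD (i+1) ' ' = ')'
            · rw [if_pos hsc, aLoop_skip, aLoop_eq_greedy chars (i+2), hg]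
              rw [hgd, hgd1] at hsc
              rw [if_neg (by rintro ⟨h1', _⟩; rw [hsc.1] at h1'; exact absurd h1' (by decide)), if_pos hsc]
              simp
            · by_cases hsn : chars.getD i ' ' = '*' ∧ chars.getD (i+1) ' ' ≠ ')'
              · rw [if_neg hsc, if_pos hsn, aLoop_eq_greedy chars (i+1), hg]
                rw [hgd, hgd1] at hsn
                rw [if_neg (by rintro ⟨h1', _⟩; rw [hsn.1] at h1'; exact absurd h1' (by decide)), if_neg (by tauto), hgd]
                simp
              · exfalso
                rw [hgd, hgd1] at hos hon hsc hsn
                rw [hgd] at hc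
                tauto
  · have : chars.drop i = [] := List.drop_eq_nil_of_le (by omega)
    rw [aLoop, if_neg h, this]
    simp [greedy]
termination_by chars.length - i
decreasing_by all_goals omega

theorem split2_ne_nil (a b : Char) (cs : List Char) : split2 a b cs ≠ [] := by
  match cs with
  | [] => simp [split2]
  | [c] => simp [split2]
  | c :: d :: rest =>
    rw [split2]
    split
    · simp
    · cases h : split2 a b (d :: rest) <;> simp

-- non-matching pair at the front: the first character joins the head piece
theorem split2_cons2 (a b c d : Char) (rest p : List Char) (ps : List (List Char))
    (hnp : ¬(c = a ∧ d = b)) (h : split2 a b (d :: rest) = p :: ps) :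
    split2 a b (c :: d :: rest) = (c :: p) :: ps := by
  rw [split2, if_neg hnp, h]

-- any character ≠ a joins the head piece of the split of the tail
theorem split2_cons (a b c : Char) (tl p : List Char) (ps : List (List Char))
    (hca : c ≠ a) (h : split2 a b tl = p :: ps) :
    split2 a b (c :: tl) = (c :: p) :: ps := by
  match tl with
  | [] =>
    simp [split2] at h
    simp [split2, ← h.1, ← h.2]
  | d :: rest =>
    exact split2_cons2 a b c d rest p ps (by tauto) h

-- the head piece of a split of c::tl is empty or starts with c
theorem split2_head (a b c : Char) (tl p : List Char) (ps : List (List Char))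
    (h : split2 a b (c :: tl) = p :: ps) :
    p = [] ∨ ∃ h', p = c :: h' := by
  match tl with
  | [] =>
    simp [split2] at h
    right
    exact ⟨[], h.1.symm⟩
  | d :: rest =>
    rw [split2] at h
    by_cases hp : c = a ∧ d = b
    · rw [if_pos hp] at h
      left
      exact (List.cons.injEq _ _ _ _ ▸ h).1.symm
    · rw [if_neg hp] at h
      rcases h2 : split2 a b (d :: rest) with _ | ⟨q, qs⟩
      · exact absurd h2 (split2_ne_nil a b _)
      · rw [h2] at h
        right
        exact ⟨q, ((List.cons.injEq _ _ _ _).mp h).1.symm⟩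

theorem bJoin_cons_head (sep : String) (x : String) (p : List String) (ps : List (List String)) :
    bJoin sep ((x :: p) :: ps) = x :: bJoin sep (p :: ps) := by
  simp [bJoin]

theorem bChunk_nil : bChunk [] = [] := by
  simp [bChunk, split2, bJoin]

theorem bChunk_pair (h : List Char) : bChunk ('*' :: ')' :: h) = "*)" :: bChunk h := by
  unfold bChunk
  rw [split2, if_pos ⟨rfl, rfl⟩]
  rcases h2 : split2 '*' ')' h with _ | ⟨q, qs⟩
  · exact absurd h2 (split2_ne_nil _ _ _)
  · simp [bJoin]

theorem bChunk_cons (c : Char) (p : List Char)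
    (hh : ¬(c = '*' ∧ p.head? = some ')')) :
    bChunk (c :: p) = String.mk [c] :: bChunk p := by
  match p with
  | [] => simp [bChunk, split2, bJoin]
  | d :: h' =>
    unfold bChunk
    rcases h2 : split2 '*' ')' (d :: h') with _ | ⟨q, qs⟩
    · exact absurd h2 (split2_ne_nil _ _ _)
    · rw [split2_cons2 '*' ')' c d h' q qs (by simp at hh; tauto) h2]
      simp [bJoin]

theorem bside (cs : List Char) :
    bJoin "(*" ((split2 '(' '*' cs).map bChunk) = greedy cs := by
  match cs with
  | [] => simp [split2, bChunk, bJoin, greedy]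
  | [c] => simp [split2, bChunk, bJoin, greedy]
  | c :: d :: rest =>
    by_cases p1 : c = '(' ∧ d = '*'
    · rw [split2, if_pos p1, greedy, if_pos p1]
      rcases h2 : split2 '(' '*' rest with _ | ⟨q, qs⟩
      · exact absurd h2 (split2_ne_nil _ _ _)
      · rw [← bside rest, h2]
        simp [bJoin, bChunk_nil]
    · by_cases p2 : c = '*' ∧ d = ')'
      · obtain ⟨rfl, rfl⟩ := p2
        rcases h2 : split2 '(' '*' rest with _ | ⟨q, qs⟩
        · exact absurd h2 (split2_ne_nil _ _ _)
        · have hd : split2 '(' '*' (')' :: rest) = (')' :: q) :: qs :=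
            split2_cons '(' '*' ')' rest q qs (by decide) h2
          have hc : split2 '(' '*' ('*' :: ')' :: rest) = ('*' :: ')' :: q) :: qs :=
            split2_cons2 '(' '*' '*' ')' rest (')' :: q) qs (by decide) hd
          rw [hc, greedy, if_neg (by decide), if_pos ⟨rfl, rfl⟩, ← bside rest, h2]
          simp only [List.map_cons, bChunk_pair]
          rw [bJoin_cons_head]
      · rcases h2 : split2 '(' '*' (d :: rest) with _ | ⟨q, qs⟩
        · exact absurd h2 (split2_ne_nil _ _ _)
        · have hc : split2 '(' '*' (c :: d :: rest) = (c :: q) :: qs :=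
            split2_cons2 '(' '*' c d rest q qs p1 h2
          have hq : ¬(c = '*' ∧ q.head? = some ')') := by
            rcases split2_head '(' '*' d rest q qs h2 with hq0 | ⟨h', rfl⟩
            · subst hq0; simp
            · simp only [List.head?_cons, Option.some.injEq]
              tauto
          rw [hc, greedy, if_neg p1, if_neg p2, ← bside (d :: rest), h2]
          simp only [List.map_cons, bChunk_cons c q hq]
          rw [bJoin_cons_head]
termination_by cs.length

-- ===== VERDICT (by name: the statement is the Claim_ definition above) =====
theorem make_formatted_line_spec : Claim_equal_make_formatted_line := by
  intro line _
  unfold Spec_make_formatted_line make_formatted_line make_formatted_line_alt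
  rw [aLoop_eq_greedy line.toList 0 [], bside]
  simp
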